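-- pv_equiv track=rewrite | github.com/santimc98/StrategyEngine-AI | src/utils/openrouter_reasoning.py | lower_token_budget_in_call_kwargs
-- ===== SOURCE A (Python) =====
-- from typing import Any, Dict
--
-- _MAX_TOKEN_FALLBACK_STEPS = (49152, 32768, 24576, 16384, 8192, 4096, 2048)
--
-- def _coerce_positive_int(value: Any) -> int | None:
--     try:
--         parsed = int(value)
--     except Exception:
--         return None
--     return parsed if parsed > 0 else None
--
-- def lower_token_budget_in_call_kwargs(call_kwargs: Dict[str, Any] | None) -> Dict[str, Any] | None:
--     kwargs = dict(call_kwargs or {})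
--     current = _coerce_positive_int(kwargs.get("max_tokens"))
--     if current is None:
--         return None
--     for candidate in _MAX_TOKEN_FALLBACK_STEPS:
--         if candidate < current:
--             lowered = dict(kwargs)
--             lowered["max_tokens"] = candidate
--             return lowered
--     return None
-- ===== SOURCE B (Python) =====
-- _ASC_STEPS = (2048, 4096, 8192, 16384, 24576, 32768, 49152)
--
-- def lower_token_budget_in_call_kwargs(call_kwargs):
--     kwargs = dict(call_kwargs or {})
--     raw = kwargs.get("max_tokens")
--     try:
--         current = int(raw)
--     except Exception:
--         return None
--     if current <= 0:
--         return None
--     # binary search: lo = number of steps strictly below current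
--     lo, hi = 0, len(_ASC_STEPS)
--     while lo < hi:
--         mid = (lo + hi) // 2
--         if _ASC_STEPS[mid] < current:
--             lo = mid + 1
--         else:
--             hi = mid
--     if lo == 0:
--         return None
--     lowered = dict(kwargs)
--     lowered["max_tokens"] = _ASC_STEPS[lo - 1]
--     return lowered
-- ===== Notes on version B (the rewrite author's own statement) =====
-- stated objective: alternative
-- what changed: Replaces the linear scan of the descending fallback tuple with a binary search over the ascending steps that finds the largest step strictly below the current budget.
import Mathlib
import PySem

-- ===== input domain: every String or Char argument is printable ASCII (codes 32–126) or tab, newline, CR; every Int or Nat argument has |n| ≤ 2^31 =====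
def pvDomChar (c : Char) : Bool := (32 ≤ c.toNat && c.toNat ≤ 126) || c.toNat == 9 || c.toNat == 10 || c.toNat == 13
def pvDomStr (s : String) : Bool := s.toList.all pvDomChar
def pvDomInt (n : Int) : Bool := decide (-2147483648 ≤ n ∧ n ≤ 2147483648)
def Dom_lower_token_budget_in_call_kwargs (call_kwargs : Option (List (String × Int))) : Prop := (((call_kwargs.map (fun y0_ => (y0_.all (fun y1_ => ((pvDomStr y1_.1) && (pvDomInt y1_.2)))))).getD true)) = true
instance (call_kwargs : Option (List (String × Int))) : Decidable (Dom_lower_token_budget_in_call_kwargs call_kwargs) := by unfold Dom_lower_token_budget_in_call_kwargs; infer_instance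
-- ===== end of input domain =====

-- B replaces A's linear scan of the descending fallback tuple with a binary search over the
-- ascending steps (alternative algorithm, same behaviour).

-- ===== PORT A =====
-- _MAX_TOKEN_FALLBACK_STEPS (descending)
def pvStepsA : List Int := [49152, 32768, 24576, 16384, 8192, 4096, 2048]

-- _coerce_positive_int on an Int value that is present (int(...) never raises on an int)
def pvCoercePositiveInt (value : Option Int) : Option Int :=
  match value with
  | none => none            -- int(None) raises TypeError, caught → None
  | some parsed => if parsed > 0 then some parsed else none

-- the 'for candidate in _MAX_TOKEN_FALLBACK_STEPS' loop
def pvLoopA (kwargs : PySem.Dict String Int) (current : Int) : List Int → Option (List (String × Int))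
  | [] => none
  | candidate :: rest =>
      if candidate < current then
        some ((PySem.Dict.insert kwargs "max_tokens" candidate).items)
      else pvLoopA kwargs current rest

def lower_token_budget_in_call_kwargs (call_kwargs : Option (List (String × Int))) : Option (List (String × Int)) :=
  let kwargs := PySem.Dict.ofList (call_kwargs.getD [])
  match pvCoercePositiveInt (kwargs.get? "max_tokens") with
  | none => none
  | some current => pvLoopA kwargs current pvStepsA

-- ===== PORT B =====
-- _ASC_STEPS (ascending)
def pvStepsB : List Int := [2048, 4096, 8192, 16384, 24576, 32768, 49152]

-- the 'while lo < hi' binary search: lo = number of steps strictly below current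
def pvBisect (current : Int) (lo hi : Nat) : Nat :=
  if _h : lo < hi then
    let mid := (lo + hi) / 2
    if pvStepsB.getD mid 0 < current then pvBisect current (mid + 1) hi
    else pvBisect current lo mid
  else lo
termination_by hi - lo
decreasing_by all_goals omega

def lower_token_budget_in_call_kwargs_alt (call_kwargs : Option (List (String × Int))) : Option (List (String × Int)) :=
  let kwargs := PySem.Dict.ofList (call_kwargs.getD [])
  match kwargs.get? "max_tokens" with
  | none => none            -- int(None) raises → return None
  | some current =>
      if current ≤ 0 then none
      else
        let lo := pvBisect current 0 pvStepsB.length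
        if lo = 0 then none
        else some ((PySem.Dict.insert kwargs "max_tokens" (pvStepsB.getD (lo - 1) 0)).items)

-- ===== PRECONDITION & SPEC =====
def Spec_lower_token_budget_in_call_kwargs (call_kwargs : Option (List (String × Int))) (out : Option (List (String × Int))) : Prop := out = lower_token_budget_in_call_kwargs_alt call_kwargs
instance (call_kwargs : Option (List (String × Int))) (out : Option (List (String × Int))) : Decidable (Spec_lower_token_budget_in_call_kwargs call_kwargs out) := by unfold Spec_lower_token_budget_in_call_kwargs; infer_instance

-- ===== CLAIM (what is proved, stated in full; the proofs are below) =====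
def Claim_equal_lower_token_budget_in_call_kwargs : Prop := ∀ (call_kwargs : Option (List (String × Int))), Dom_lower_token_budget_in_call_kwargs call_kwargs → Spec_lower_token_budget_in_call_kwargs call_kwargs (lower_token_budget_in_call_kwargs call_kwargs)

-- ===== LEMMAS AND PROOFS =====

-- the selection step agrees: first descending step < current = largest ascending step < current
lemma pvSelect_eq (kwargs : PySem.Dict String Int) (current : Int) :
    pvLoopA kwargs current pvStepsA =
      (if pvBisect current 0 pvStepsB.length = 0 then none
       else some ((PySem.Dict.insert kwargs "max_tokens"
                    (pvStepsB.getD (pvBisect current 0 pvStepsB.length - 1) 0)).items)) := by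
  by_cases h1 : 49152 < current
  · simp [pvLoopA, pvStepsA, pvBisect, pvStepsB, h1, (show (16384:Int) < current by omega),
      (show (32768:Int) < current by omega)]
  · by_cases h2 : 32768 < current
    · simp [pvLoopA, pvStepsA, pvBisect, pvStepsB, h1, h2, (show (16384:Int) < current by omega)]
    · by_cases h3 : 24576 < current
      · simp [pvLoopA, pvStepsA, pvBisect, pvStepsB, h1, h2, h3, (show (16384:Int) < current by omega)]
      · by_cases h4 : 16384 < current
        · simp [pvLoopA, pvStepsA, pvBisect, pvStepsB, h1, h2, h3, h4]
        · by_cases h5 : 8192 < current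
          · simp [pvLoopA, pvStepsA, pvBisect, pvStepsB, h1, h2, h3, h4, h5,
              (show (4096:Int) < current by omega)]
          · by_cases h6 : 4096 < current
            · simp [pvLoopA, pvStepsA, pvBisect, pvStepsB, h1, h2, h3, h4, h5, h6]
            · by_cases h7 : 2048 < current
              · simp [pvLoopA, pvStepsA, pvBisect, pvStepsB, h1, h2, h3, h4, h5, h6, h7]
              · simp [pvLoopA, pvStepsA, pvBisect, pvStepsB, h1, h2, h3, h4, h5, h6, h7]

-- ===== VERDICT (by name: the statement is the Claim_ definition above) =====
theorem lower_token_budget_in_call_kwargs_spec : Claim_equal_lower_token_budget_in_call_kwargs := by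
  intro call_kwargs _
  unfold Spec_lower_token_budget_in_call_kwargs
  unfold lower_token_budget_in_call_kwargs lower_token_budget_in_call_kwargs_alt
  cases hg : (PySem.Dict.ofList (call_kwargs.getD [])).get? "max_tokens" with
  | none => simp [pvCoercePositiveInt, hg]
  | some current =>
      by_cases hpos : current > 0
      · simp [pvCoercePositiveInt, hg, hpos, (show ¬ current ≤ 0 by omega), pvSelect_eq]
      · simp [pvCoercePositiveInt, hg, hpos, (show current ≤ 0 by omega)]
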